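-- pv_equiv track=rewrite | github.com/sebols-ns/dynamic-pricing-rl-demo | python-dqn/scripts/export_policy.py | generate_discrete_states
-- ===== SOURCE A (Python) =====
-- def generate_discrete_states(
--     demand_bins: int,
--     competitor_bins: int,
--     season_bins: int,
--     lag_bins: int,
--     inventory_bins: int,
--     forecast_bins: int,
--     has_extended_state: bool
-- ) -> list:
--     """
--     Generate all discrete states.
--
--     Returns:
--         List of discrete state dictionaries
--     """
--     states = []
--
--     inv_range = range(inventory_bins) if has_extended_state else [0]
--     fcst_range = range(forecast_bins) if has_extended_state else [0]
--
--     for demand_bin in range(demand_bins):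
--         for comp_bin in range(competitor_bins):
--             for season_bin in range(season_bins):
--                 for lag_bin in range(lag_bins):
--                     for inv_bin in inv_range:
--                         for fcst_bin in fcst_range:
--                             states.append({
--                                 'demandBin': demand_bin,
--                                 'competitorPriceBin': comp_bin,
--                                 'seasonBin': season_bin,
--                                 'lagPriceBin': lag_bin,
--                                 'inventoryBin': inv_bin,
--                                 'forecastBin': fcst_bin
--                             })
--
--     return states
-- ===== SOURCE B (Python) =====
-- def generate_discrete_states(
--     demand_bins: int,
--     competitor_bins: int,
--     season_bins: int,
--     lag_bins: int,
--     inventory_bins: int,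
--     forecast_bins: int,
--     has_extended_state: bool
-- ) -> list:
--     """Cartesian product built by folding over an ordered field list."""
--     fields = [
--         ('demandBin', range(demand_bins)),
--         ('competitorPriceBin', range(competitor_bins)),
--         ('seasonBin', range(season_bins)),
--         ('lagPriceBin', range(lag_bins)),
--         ('inventoryBin', range(inventory_bins) if has_extended_state else [0]),
--         ('forecastBin', range(forecast_bins) if has_extended_state else [0]),
--     ]
--     acc = [{}]
--     for key, rng in fields:
--         acc = [{**partial, key: v} for partial in acc for v in rng]
--     return acc
-- ===== Notes on version B (the rewrite author's own statement) =====
-- stated objective: alternative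
-- what changed: Replaces the six fixed nested loops with a single fold over an ordered (key, range) field list that extends a growing list of partial dictionaries, so the product is built dimension by dimension.
import Mathlib
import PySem

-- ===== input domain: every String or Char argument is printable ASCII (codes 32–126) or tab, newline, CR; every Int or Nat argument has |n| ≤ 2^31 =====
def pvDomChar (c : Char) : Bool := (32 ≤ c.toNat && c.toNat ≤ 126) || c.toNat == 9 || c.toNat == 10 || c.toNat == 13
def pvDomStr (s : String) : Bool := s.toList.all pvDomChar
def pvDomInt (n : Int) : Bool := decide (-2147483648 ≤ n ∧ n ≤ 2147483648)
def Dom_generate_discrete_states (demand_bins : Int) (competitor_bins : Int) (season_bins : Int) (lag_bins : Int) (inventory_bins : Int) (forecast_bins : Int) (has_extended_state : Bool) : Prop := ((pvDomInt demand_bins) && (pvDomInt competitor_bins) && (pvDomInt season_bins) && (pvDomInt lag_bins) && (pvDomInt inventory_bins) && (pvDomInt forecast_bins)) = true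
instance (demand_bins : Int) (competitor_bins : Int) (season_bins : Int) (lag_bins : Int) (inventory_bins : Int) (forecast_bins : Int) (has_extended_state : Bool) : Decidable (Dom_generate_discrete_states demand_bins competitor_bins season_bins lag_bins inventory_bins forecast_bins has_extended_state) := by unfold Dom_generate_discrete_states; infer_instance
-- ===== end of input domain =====

-- B replaces A's six fixed nested loops by one fold over an ordered (key, range) list of fields,
-- growing a list of partial dictionaries; same output, alternative decomposition (no speed claim).

-- ===== PORT A =====
def generate_discrete_states (demand_bins : Int) (competitor_bins : Int) (season_bins : Int) (lag_bins : Int) (inventory_bins : Int) (forecast_bins : Int) (has_extended_state : Bool) : List (List (String × Int)) :=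
  -- Python's range(...) is a lazy O(1) object; the port keeps inv_range/fcst_range as thunks
  -- and materializes them where the loops iterate them (same values, Python's laziness).
  let inv_range : Unit → List Int := fun _ => if has_extended_state then PySem.List.pyRange 0 inventory_bins 1 else [0]
  let fcst_range : Unit → List Int := fun _ => if has_extended_state then PySem.List.pyRange 0 forecast_bins 1 else [0]
  (PySem.List.pyRange 0 demand_bins 1).foldl (fun states demand_bin =>
    (PySem.List.pyRange 0 competitor_bins 1).foldl (fun states comp_bin =>
      (PySem.List.pyRange 0 season_bins 1).foldl (fun states season_bin =>
        (PySem.List.pyRange 0 lag_bins 1).foldl (fun states lag_bin =>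
          (inv_range ()).foldl (fun states inv_bin =>
            (fcst_range ()).foldl (fun states fcst_bin =>
              states ++ [[("demandBin", demand_bin), ("competitorPriceBin", comp_bin),
                          ("seasonBin", season_bin), ("lagPriceBin", lag_bin),
                          ("inventoryBin", inv_bin), ("forecastBin", fcst_bin)]])
              states) states) states) states) states) []

-- ===== PORT B =====
def generate_discrete_states_alt (demand_bins : Int) (competitor_bins : Int) (season_bins : Int) (lag_bins : Int) (inventory_bins : Int) (forecast_bins : Int) (has_extended_state : Bool) : List (List (String × Int)) :=
  -- The field list holds Python range objects, which are lazy: stored as thunks, forced at iteration.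
  let fields : List (String × (Unit → List Int)) :=
    [ ("demandBin", fun _ => PySem.List.pyRange 0 demand_bins 1),
      ("competitorPriceBin", fun _ => PySem.List.pyRange 0 competitor_bins 1),
      ("seasonBin", fun _ => PySem.List.pyRange 0 season_bins 1),
      ("lagPriceBin", fun _ => PySem.List.pyRange 0 lag_bins 1),
      ("inventoryBin", fun _ => if has_extended_state then PySem.List.pyRange 0 inventory_bins 1 else [0]),
      ("forecastBin", fun _ => if has_extended_state then PySem.List.pyRange 0 forecast_bins 1 else [0]) ]
  -- '{**partial, key: v}': the six keys are pairwise distinct, so the merge appends the new pair.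
  fields.foldl (fun acc kr => acc.flatMap (fun part => (kr.2 ()).map (fun v => part ++ [(kr.1, v)]))) [[]]

-- ===== PRECONDITION & SPEC =====
def Spec_generate_discrete_states (demand_bins : Int) (competitor_bins : Int) (season_bins : Int) (lag_bins : Int) (inventory_bins : Int) (forecast_bins : Int) (has_extended_state : Bool) (out : List (List (String × Int))) : Prop := out = generate_discrete_states_alt demand_bins competitor_bins season_bins lag_bins inventory_bins forecast_bins has_extended_state
instance (demand_bins : Int) (competitor_bins : Int) (season_bins : Int) (lag_bins : Int) (inventory_bins : Int) (forecast_bins : Int) (has_extended_state : Bool) (out : List (List (String × Int))) : Decidable (Spec_generate_discrete_states demand_bins competitor_bins season_bins lag_bins inventory_bins forecast_bins has_extended_state out) := by unfold Spec_generate_discrete_states; infer_instance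

-- ===== CLAIM (what is proved, stated in full; the proofs are below) =====
def Claim_equal_generate_discrete_states : Prop := ∀ (demand_bins : Int) (competitor_bins : Int) (season_bins : Int) (lag_bins : Int) (inventory_bins : Int) (forecast_bins : Int) (has_extended_state : Bool), Dom_generate_discrete_states demand_bins competitor_bins season_bins lag_bins inventory_bins forecast_bins has_extended_state → Spec_generate_discrete_states demand_bins competitor_bins season_bins lag_bins inventory_bins forecast_bins has_extended_state (generate_discrete_states demand_bins competitor_bins season_bins lag_bins inventory_bins forecast_bins has_extended_state)

-- ===== LEMMAS AND PROOFS =====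

-- ===== VERDICT (by name: the statement is the Claim_ definition above) =====
theorem generate_discrete_states_spec : Claim_equal_generate_discrete_states := by
  intro d c s l inv f ext _
  unfold Spec_generate_discrete_states generate_discrete_states generate_discrete_states_alt
  simp only [List.foldl_cons, List.foldl_nil,
    PySem.List.foldl_append_singleton_eq_map, PySem.List.foldl_append_eq_flatMap,
    List.flatMap_assoc, List.flatMap_map, List.flatMap_cons, List.flatMap_nil,
    List.nil_append, List.cons_append, List.append_nil]
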